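-- pv_equiv track=rewrite | github.com/bmad-sim/pytao | pytao/errors.py | filter_output_lines
-- ===== SOURCE A (Python) =====
-- from typing import Dict, FrozenSet, Iterable, List, Literal, Optional, Set, Tuple
--
-- def filter_output_lines(lines: List[str], exclude: Set[str]) -> List[str]:
--     """
--     Filter Tao output text lines.
--
--     Parameters
--     ----------
--     lines : List[str]
--         Lines from Tao.
--     exclude : Set[str]
--         Function names to exclude.
--
--     Returns
--     -------
--     List[str]
--         Lines filtered, excluding those pertaining to the requested functions.
--     """
--     removing_block = False
--     out_lines = []
--     for line in lines:
--         if removing_block: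
--             if not line.strip():
--                 # Empty line -> skip
--                 continue
--             if line[0].isspace():
--                 # Lines starting with spaces in a skipped block are ignored
--                 continue
--             removing_block = False
--
--         if not line.startswith("[ERROR"):
--             out_lines.append(line)
--             continue
--
--         for func in exclude:
--             if line.endswith(f"{func}:"):
--                 removing_block = True
--                 break
--         else:
--             out_lines.append(line)
--
--     return out_lines
-- ===== SOURCE B (Python) =====
-- from typing import List, Set
--
-- def filter_output_lines(lines: List[str], exclude: Set[str]) -> List[str]:
--     # Stage 1: group the lines into blocks: each non-blank line whose first
--     # character is not whitespace starts a new block; blank or indented lines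
--     # belong to the current block (a possibly-empty headerless prefix block
--     # collects leading blank/indented lines).
--     def is_continuation(line):
--         return not line.strip() or line[0].isspace()
--
--     blocks = [[]]
--     for line in lines:
--         if is_continuation(line):
--             blocks[-1].append(line)
--         else:
--             blocks.append([line])
--
--     # Stage 2: drop every block whose header is an excluded ERROR line
--     # (a continuation line can never start with "[ERROR", so only headers match),
--     # then flatten the kept blocks back into a flat list.
--     out = []
--     for block in blocks:
--         if block and block[0].startswith("[ERROR") and any(
--             block[0].endswith(f"{func}:") for func in exclude
--         ):
--             continue
--         out.extend(block)
--     return out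
-- ===== Notes on version B (the rewrite author's own statement) =====
-- stated objective: alternative
-- what changed: Replaces A's single-pass state machine with a removing_block flag by a staged pipeline: one pass groups the lines into blocks (a header line plus its trailing blank/indented continuation lines), a second pass drops whole blocks whose header is an excluded [ERROR line and flattens the rest.
import Mathlib
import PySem

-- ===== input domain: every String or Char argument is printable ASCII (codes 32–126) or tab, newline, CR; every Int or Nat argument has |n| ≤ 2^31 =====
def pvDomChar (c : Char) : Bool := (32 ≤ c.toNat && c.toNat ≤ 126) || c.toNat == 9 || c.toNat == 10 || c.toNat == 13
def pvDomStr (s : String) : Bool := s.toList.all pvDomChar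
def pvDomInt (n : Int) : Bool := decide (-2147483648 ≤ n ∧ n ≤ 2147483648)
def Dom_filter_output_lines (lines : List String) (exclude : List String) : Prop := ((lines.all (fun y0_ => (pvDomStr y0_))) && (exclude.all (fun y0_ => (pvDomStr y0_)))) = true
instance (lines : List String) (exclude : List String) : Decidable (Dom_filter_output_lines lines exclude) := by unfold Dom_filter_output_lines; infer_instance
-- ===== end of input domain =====

-- B replaces A's single-pass removing_block state machine by a staged pipeline:
-- group lines into blocks (header + blank/indented continuations), drop blocks
-- with an excluded ERROR header, flatten (objective: alternative, same cost).

-- ===== PORT A =====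
-- the part of A's loop body after the removing_block handling (removing_block is False there)
def pvStepA2 (exclude : List String) (out : List String) (line : String) : Bool × List String :=
  if ¬ (PySem.Str.startswith line "[ERROR" = true) then (false, out ++ [line])
  else if exclude.any (fun func => PySem.Str.endswith line (func ++ ":")) then (true, out)
  else (false, out ++ [line])

def pvStepA (exclude : List String) (st : Bool × List String) (line : String) : Bool × List String :=
  if st.1 then
    if PySem.Str.strip line == "" then st            -- empty line -> skip
    else if (match PySem.List.pyGet? line.toList 0 with
             | some c => PySem.Chars.isspace c
             | none => false) then st                -- starts with space -> skip
    else pvStepA2 exclude st.2 line                  -- removing_block := False, fall through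
  else pvStepA2 exclude st.2 line

def filter_output_lines (lines : List String) (exclude : List String) : List String :=
  (lines.foldl (pvStepA exclude) (false, [])).2

-- ===== PORT B =====
-- B's is_continuation: `not line.strip() or line[0].isspace()` (line[0] is only
-- reached when strip is nonempty, so the guarded match is exact)
def pvContB (line : String) : Bool :=
  (PySem.Str.strip line == "") ||
    (match PySem.List.pyGet? line.toList 0 with
     | some c => PySem.Chars.isspace c
     | none => false)

-- Python `blocks[-1].append(line)`: append to the last block (blocks is never empty)
def pvAppendLast : List (List String) → String → List (List String)
  | [], line => [[line]]            -- unreachable: blocks starts as [[]]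
  | [c], line => [c ++ [line]]
  | c :: rest, line => c :: pvAppendLast rest line

-- stage 1 loop body
def pvChunkStep (st : List (List String)) (line : String) : List (List String) :=
  if pvContB line then pvAppendLast st line else st ++ [[line]]

-- stage 2 test: drop the block iff its header is an excluded ERROR line
def pvDropBlock (exclude : List String) : List String → Bool
  | [] => false
  | h :: _ => PySem.Str.startswith h "[ERROR" &&
      exclude.any (fun func => PySem.Str.endswith h (func ++ ":"))

def filter_output_lines_alt (lines : List String) (exclude : List String) : List String :=
  (lines.foldl pvChunkStep [[]]).foldl
    (fun out b => if pvDropBlock exclude b then out else out ++ b) []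

-- ===== PRECONDITION & SPEC =====
def Spec_filter_output_lines (lines : List String) (exclude : List String) (out : List String) : Prop := out = filter_output_lines_alt lines exclude
instance (lines : List String) (exclude : List String) (out : List String) : Decidable (Spec_filter_output_lines lines exclude out) := by unfold Spec_filter_output_lines; infer_instance

-- ===== CLAIM (what is proved, stated in full; the proofs are below) =====
def Claim_equal_filter_output_lines : Prop := ∀ (lines : List String) (exclude : List String), Dom_filter_output_lines lines exclude → Spec_filter_output_lines lines exclude (filter_output_lines lines exclude)

-- ===== LEMMAS AND PROOFS =====

-- intermediate cons-recursive description of the filtering (proof device only)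
def pvSkipBlock : List String → List String
  | [] => []
  | l :: rest => if pvContB l then pvSkipBlock rest else l :: rest

theorem pvSkipBlock_length_le (l : List String) : (pvSkipBlock l).length ≤ l.length := by
  induction l with
  | nil => simp [pvSkipBlock]
  | cons x xs ih =>
      simp only [pvSkipBlock]
      split
      · simpa using Nat.le_succ_of_le ih
      · simp

def pvGoB (exclude : List String) : List String → List String
  | [] => []
  | line :: rest =>
    if PySem.Str.startswith line "[ERROR" && exclude.any (fun func => PySem.Str.endswith line (func ++ ":"))
    then pvGoB exclude (pvSkipBlock rest)
    else line :: pvGoB exclude rest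
termination_by l => l.length
decreasing_by
  · exact Nat.lt_succ_of_le (pvSkipBlock_length_le rest)
  · simp

-- ---- A's fold equals pvGoB ----

theorem pvStepA2_excl (ex : List String) (out : List String) (line : String)
    (h1 : PySem.Str.startswith line "[ERROR" = true)
    (h2 : (ex.any (fun func => PySem.Str.endswith line (func ++ ":"))) = true) :
    pvStepA2 ex out line = (true, out) := by
  unfold pvStepA2
  rw [if_neg (not_not_intro h1), if_pos h2]

theorem pvStepA2_keep (ex : List String) (out : List String) (line : String)
    (h : ¬ ((PySem.Str.startswith line "[ERROR" && ex.any (fun func => PySem.Str.endswith line (func ++ ":"))) = true)) :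
    pvStepA2 ex out line = (false, out ++ [line]) := by
  unfold pvStepA2
  by_cases hs : PySem.Str.startswith line "[ERROR" = true
  · have ha : ¬ ((ex.any (fun func => PySem.Str.endswith line (func ++ ":"))) = true) := by
      intro ha; exact h (by rw [hs, ha]; rfl)
    rw [if_neg (not_not_intro hs), if_neg ha]
  · rw [if_pos hs]

theorem pvStepA_false (ex : List String) (out : List String) (line : String) :
    pvStepA ex (false, out) line = pvStepA2 ex out line := by
  unfold pvStepA
  rw [if_neg (by simp)]

theorem pvStepA_true_skip (ex : List String) (out : List String) (line : String)
    (h : pvContB line = true) :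
    pvStepA ex (true, out) line = (true, out) := by
  unfold pvStepA
  rw [if_pos (by simp)]
  rcases (Bool.or_eq_true _ _).mp h with h | h
  · rw [if_pos h]
  · by_cases hs : (PySem.Str.strip line == "") = true
    · rw [if_pos hs]
    · rw [if_neg hs, if_pos h]

theorem pvStepA_true_stop (ex : List String) (out : List String) (line : String)
    (h : ¬ (pvContB line = true)) :
    pvStepA ex (true, out) line = pvStepA2 ex out line := by
  unfold pvStepA
  unfold pvContB at h
  rw [Bool.or_eq_true, not_or] at h
  rw [if_pos (by simp), if_neg h.1, if_neg h.2]

theorem pv_foldl_true (ex : List String) (l : List String) (out : List String) :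
    (List.foldl (pvStepA ex) (true, out) l).2 = (List.foldl (pvStepA ex) (false, out) (pvSkipBlock l)).2 := by
  induction l generalizing out with
  | nil => simp [pvSkipBlock]
  | cons line rest ih =>
    by_cases h : pvContB line = true
    · simp only [List.foldl_cons, pvStepA_true_skip ex out line h, pvSkipBlock, if_pos h]
      exact ih out
    · simp only [List.foldl_cons, pvStepA_true_stop ex out line h, pvSkipBlock, if_neg h,
        pvStepA_false]

theorem pv_main (ex : List String) : ∀ (n : Nat) (l : List String), l.length ≤ n →
    ∀ (out : List String), (List.foldl (pvStepA ex) (false, out) l).2 = out ++ pvGoB ex l := by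
  intro n
  induction n with
  | zero =>
    intro l hl out
    have : l = [] := List.eq_nil_of_length_eq_zero (Nat.le_zero.mp hl)
    subst this; simp [pvGoB]
  | succ n ih =>
    intro l hl out
    cases l with
    | nil => simp [pvGoB]
    | cons line rest =>
      simp only [List.foldl_cons, pvStepA_false]
      by_cases hc : (PySem.Str.startswith line "[ERROR" && ex.any (fun func => PySem.Str.endswith line (func ++ ":"))) = true
      · rw [pvStepA2_excl ex out line ((Bool.and_eq_true _ _).mp hc).1 ((Bool.and_eq_true _ _).mp hc).2]
        rw [pv_foldl_true]
        have hlen : (pvSkipBlock rest).length ≤ n := by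
          have := pvSkipBlock_length_le rest
          simp at hl; omega
        rw [ih _ hlen out, pvGoB, if_pos hc]
      · rw [pvStepA2_keep ex out line hc]
        have hlen : rest.length ≤ n := by simp at hl; omega
        rw [ih _ hlen (out ++ [line]), pvGoB, if_neg hc]
        simp

-- ---- B's staged pipeline equals pvGoB ----

theorem pv_pyGet_zero (c : Char) (t : List Char) : PySem.List.pyGet? (c :: t) (0 : Int) = some c := by
  simp [PySem.List.pyGet?, PySem.List.pyIdx?]

-- a continuation line never starts with "[ERROR"
theorem pvContB_not_err (y : String) (h : pvContB y = true) :
    PySem.Str.startswith y "[ERROR" = false := by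
  by_contra hb
  rw [Bool.not_eq_false] at hb
  have hb' : PySem.Chars.startswith y.toList "[ERROR".toList = true := by simpa using hb
  obtain ⟨s, hs⟩ := (PySem.Chars.startswith_iff _ _).mp hb'
  have hy : y.toList = '[' :: ("ERROR".toList ++ s) := by rw [← hs]; rfl
  rcases (Bool.or_eq_true _ _).mp h with h1 | h2
  · have h1' : (PySem.Str.strip y).toList = [] := by
      have : PySem.Str.strip y = "" := by simpa using h1
      simp [this]
    rw [PySem.Str.toList_strip, hy] at h1'
    have hne : PySem.Chars.strip ('[' :: ("ERROR".toList ++ s)) ≠ [] := by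
      simp [PySem.Chars.strip, PySem.Chars.lstrip, PySem.Chars.rstrip, PySem.Chars.isspace]
      exact ⟨'[', by simp, by decide⟩
    exact hne h1'
  · rw [hy, pv_pyGet_zero] at h2
    exact absurd h2 (by decide)

theorem pvDropBlock_append (ex : List String) (cur : List String) (y : String)
    (h : pvContB y = true) :
    pvDropBlock ex (cur ++ [y]) = pvDropBlock ex cur := by
  cases cur with
  | nil =>
    have h' : PySem.Chars.startswith y.toList ['[', 'E', 'R', 'R', 'O', 'R'] = false := by
      simpa using pvContB_not_err y h
    simp [pvDropBlock, h']
  | cons c cs => rfl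

-- cons-recursive version of stage 1
def pvChunkAux (cur : List String) : List String → List (List String)
  | [] => [cur]
  | y :: ys => if pvContB y then pvChunkAux (cur ++ [y]) ys else cur :: pvChunkAux [y] ys

theorem pvAppendLast_append (pre : List (List String)) (cur : List String) (x : String) :
    pvAppendLast (pre ++ [cur]) x = pre ++ [cur ++ [x]] := by
  induction pre with
  | nil => rfl
  | cons p ps ih =>
    cases ps with
    | nil => rfl
    | cons q qs => simpa [pvAppendLast] using ih

theorem pv_chunk_fold (l : List String) : ∀ (pre : List (List String)) (cur : List String),
    l.foldl pvChunkStep (pre ++ [cur]) = pre ++ pvChunkAux cur l := by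
  induction l with
  | nil => intro pre cur; simp [pvChunkAux]
  | cons y ys ih =>
    intro pre cur
    by_cases h : pvContB y = true
    · simp only [List.foldl_cons, pvChunkStep, if_pos h, pvAppendLast_append, pvChunkAux]
      exact ih pre (cur ++ [y])
    · simp only [List.foldl_cons, pvChunkStep, if_neg h, pvChunkAux]
      rw [ih (pre ++ [cur]) [y]]
      simp

theorem pv_out_fold (ex : List String) (l : List (List String)) :
    ∀ (acc : List String),
    l.foldl (fun out b => if pvDropBlock ex b then out else out ++ b) acc =
      acc ++ (l.filter (fun b => !pvDropBlock ex b)).flatten := by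
  induction l with
  | nil => intro acc; simp
  | cons b bs ih =>
    intro acc
    by_cases h : pvDropBlock ex b = true
    · simp [List.foldl_cons, h, ih]
    · rw [Bool.not_eq_true] at h
      simp [List.foldl_cons, h, ih]

theorem pv_chunks_go (ex : List String) : ∀ (l : List String) (cur : List String),
    ((pvChunkAux cur l).filter (fun b => !pvDropBlock ex b)).flatten =
      if pvDropBlock ex cur then pvGoB ex (pvSkipBlock l) else cur ++ pvGoB ex l := by
  intro l
  induction l with
  | nil =>
    intro cur
    by_cases h : pvDropBlock ex cur = true
    · simp [pvChunkAux, h, pvSkipBlock, pvGoB]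
    · rw [Bool.not_eq_true] at h
      simp [pvChunkAux, h, pvSkipBlock, pvGoB]
  | cons y ys ih =>
    intro cur
    by_cases hcont : pvContB y = true
    · rw [pvChunkAux, if_pos hcont, ih (cur ++ [y]), pvDropBlock_append ex cur y hcont]
      by_cases h : pvDropBlock ex cur = true
      · rw [if_pos h, if_pos h]
        simp [pvSkipBlock, hcont]
      · rw [if_neg h, if_neg h]
        rw [pvGoB, pvContB_not_err y hcont]
        simp
    · rw [pvChunkAux, if_neg hcont]
      have hstep : pvGoB ex (y :: ys) =
          if pvDropBlock ex [y] then pvGoB ex (pvSkipBlock ys) else y :: pvGoB ex ys := by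
        rw [pvGoB]; rfl
      have hterm : pvSkipBlock (y :: ys) = y :: ys := by rw [pvSkipBlock, if_neg hcont]
      by_cases h : pvDropBlock ex cur = true <;>
      by_cases he : pvDropBlock ex [y] = true <;>
        simp [h, he, hterm, hstep, ih [y]]

theorem pv_alt_eq_go (lines : List String) (ex : List String) :
    filter_output_lines_alt lines ex = pvGoB ex lines := by
  unfold filter_output_lines_alt
  have h1 : lines.foldl pvChunkStep [[]] = pvChunkAux [] lines := by
    simpa using pv_chunk_fold lines [] []
  rw [h1, pv_out_fold]
  have := pv_chunks_go ex lines []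
  rw [this]
  simp [pvDropBlock]

-- ===== VERDICT (by name: the statement is the Claim_ definition above) =====
theorem filter_output_lines_spec : Claim_equal_filter_output_lines := by
  intro lines exclude _
  unfold Spec_filter_output_lines filter_output_lines
  rw [pv_alt_eq_go]
  simpa using pv_main exclude lines.length lines le_rfl []
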